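-- pv_equiv track=rewrite | github.com/Yizhen-Zheng/step-repo | week2/broccoli.py | solution
-- ===== SOURCE A (Python) =====
-- def solution(s: str) -> int:
--     '''
--     input:
--     GGWW
--     GWWGGWGWG
--     find min number of changes (G->W or W->G)to make to convert the string into all G are in left side and all W are in right side
--     better solution:
--     use a spliting line and sliding through the string (O(N))
--     the line represent:
--     in the left of the line, all W should be convert to G
--     in the right of the line, all G should be convert to W
--     '''
--     if len(s) <= 1:
--         return 0
--     length = len(s)
--     # O(N) to count G
--     count = s.count('G')
--     ans = count
--     # initial situations: line is in left most, so all the G should be changed to W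
--     line = 0
--     # slide the line into right
--     while line < length:
--         # each step would put current char into left side
--         if s[line] == 'G':
--             count -= 1
--             ans = min(ans, count)
--         else:
--             count += 1
--         line += 1
--     return ans
-- ===== SOURCE B (Python) =====
-- def solution(s: str) -> int:
--     # One-pass DP: a = changes to make the prefix all-G; res = min changes
--     # to make the prefix of the form G*W* (non-'G' chars count as W, as in A).
--     a = 0
--     res = 0
--     for c in s:
--         if c != 'G':
--             a += 1
--         res = min(res + (1 if c == 'G' else 0), a)
--     return res
-- ===== Notes on version B (the rewrite author's own statement) =====
-- stated objective: alternative
-- what changed: Replaces A's count-|G|-then-slide-a-split-line scan (precount + min over split positions) by a single left-to-right DP carrying two running costs (prefix-all-G cost and prefix-G*W* cost) with no precount and no split-line state.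
import Mathlib
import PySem

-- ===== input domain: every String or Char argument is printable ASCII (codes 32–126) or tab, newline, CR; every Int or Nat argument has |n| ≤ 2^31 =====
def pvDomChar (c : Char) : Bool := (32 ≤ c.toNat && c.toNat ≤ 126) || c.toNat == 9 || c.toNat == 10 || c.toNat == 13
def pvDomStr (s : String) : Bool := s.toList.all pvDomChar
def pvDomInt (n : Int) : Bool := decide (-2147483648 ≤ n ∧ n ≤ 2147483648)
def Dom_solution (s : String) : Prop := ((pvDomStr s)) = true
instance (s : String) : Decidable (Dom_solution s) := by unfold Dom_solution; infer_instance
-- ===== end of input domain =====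

-- B replaces A's precount-then-sliding-split scan by a one-pass DP over two running costs; same O(n) cost, different decomposition.

-- ===== PORT A =====
-- A's while loop body: state (count, ans); one step per character s[line].
def stepA (p : Int × Int) (c : Char) : Int × Int :=
  if c = 'G' then (p.1 - 1, min p.2 (p.1 - 1)) else (p.1 + 1, p.2)

def solution (s : String) : Int :=
  if PySem.Str.len s ≤ 1 then 0
  else
    let count : Int := (PySem.Str.count s "G" : Int)
    (s.toList.foldl stepA (count, count)).2

-- ===== PORT B =====
-- B's loop body: state (a, res); a = changes to make prefix all-G, res = changes to make prefix G*W*.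
def stepB (p : Int × Int) (c : Char) : Int × Int :=
  let a := if c ≠ 'G' then p.1 + 1 else p.1
  (a, min (p.2 + (if c = 'G' then 1 else 0)) a)

def solution_alt (s : String) : Int :=
  (s.toList.foldl stepB (0, 0)).2

-- ===== PRECONDITION & SPEC =====
def Spec_solution (s : String) (out : Int) : Prop := out = solution_alt s
instance (s : String) (out : Int) : Decidable (Spec_solution s out) := by unfold Spec_solution; infer_instance

-- ===== CLAIM (what is proved, stated in full; the proofs are below) =====
def Claim_equal_solution : Prop := ∀ (s : String), Dom_solution s → Spec_solution s (solution s)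

-- ===== LEMMAS AND PROOFS =====

-- the fuel-based substring counter, on a single-character needle, is the character count
lemma go_single : ∀ (fuel : Nat) (l : List Char) (acc : Nat), l.length ≤ fuel →
    PySem.Chars.count.go ['G'] fuel l acc = acc + l.count 'G' := by
  intro fuel
  induction fuel with
  | zero =>
    intro l acc h
    have hl : l = [] := List.eq_nil_of_length_eq_zero (by omega)
    subst hl; rw [PySem.Chars.count.go]; simp
  | succ n ih =>
    intro l acc h
    match l with
    | [] => rw [PySem.Chars.count.go]; simp; omega
    | c :: t =>
      rcases Decidable.em (c = 'G') with hc | hc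
      · subst hc
        rw [PySem.Chars.count.go]
        simp only [List.isPrefixOf, BEq.rfl, Bool.true_and, if_true, List.length_cons,
          List.drop_succ_cons, List.length_nil, List.drop_zero]
        rw [ih t (acc + 1) (by simpa using h)]
        simp; omega
      · rw [PySem.Chars.count.go]
        have hp : (['G'].isPrefixOf (c :: t)) = false := by
          simp [List.isPrefixOf]; exact fun hh => (hc hh.symm).elim
        rw [hp]
        simp only [Bool.false_eq_true, if_false]
        rw [ih t acc (by simpa using h)]
        simp [hc]

-- s.count('G') is the count of the character 'G'
lemma count_G_eq (s : String) : PySem.Str.count s "G" = s.toList.count 'G' := by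
  simp only [PySem.Str.count_eq]
  show PySem.Chars.count s.toList ['G'] = s.toList.count 'G'
  rw [PySem.Chars.count]
  simp only [List.isEmpty_cons, Bool.false_eq_true, if_false]
  rw [go_single]
  · omega
  · exact Nat.le_of_eq s.length_toList

-- Loop correspondence: A's state is B's state shifted by the number of 'G' still ahead.
lemma loop_rel (r : List Char) : ∀ (a res : Int), res ≤ a →
    (r.foldl stepA (a + (r.count 'G' : Int), res + (r.count 'G' : Int))).2
      = (r.foldl stepB (a, res)).2 := by
  induction r with
  | nil => intro a res _; simp
  | cons c t ih =>
    intro a res hle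
    rcases Decidable.em (c = 'G') with h | h
    · subst h
      simp only [List.foldl_cons, List.count_cons_self, stepA, stepB, ne_eq,
        not_true_eq_false, if_false, if_true]
      have e1 : a + ((t.count 'G' + 1 : Nat) : Int) - 1 = a + (t.count 'G' : Int) := by
        push_cast; omega
      have e2 : min (res + ((t.count 'G' + 1 : Nat) : Int)) (a + (t.count 'G' : Int))
          = min (res + 1) a + (t.count 'G' : Int) := by push_cast; omega
      rw [e1, e2]
      exact ih a (min (res + 1) a) (by omega)
    · simp only [List.foldl_cons, List.count_cons_of_ne (fun hc => h hc), stepA, stepB,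
        ne_eq, h, not_false_eq_true, if_true, reduceIte]
      have e1 : a + (t.count 'G' : Int) + 1 = (a + 1) + (t.count 'G' : Int) := by ring
      have e2 : min (res + 0) (a + 1) = res := by omega
      rw [e1, e2]
      exact ih (a + 1) res (by omega)

-- ===== VERDICT (by name: the statement is the Claim_ definition above) =====
theorem solution_spec : Claim_equal_solution := by
  intro s _
  unfold Spec_solution solution solution_alt
  rcases Decidable.em (PySem.Str.len s ≤ 1) with h | h
  · rw [if_pos h]
    have hlen : s.toList.length ≤ 1 := by simpa [PySem.Str.len_eq] using h
    match hs : s.toList, hlen with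
    | [], _ => simp
    | [c], _ =>
      rcases Decidable.em (c = 'G') with hc | hc <;> simp [stepB, hc]
  · rw [if_neg h]
    show (s.toList.foldl stepA ((PySem.Str.count s "G" : Int), (PySem.Str.count s "G" : Int))).2 = _
    rw [count_G_eq]
    have := loop_rel s.toList 0 0 (le_refl 0)
    simpa using this
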